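-- pv_equiv track=rewrite | github.com/Grivvus/Young-Yandex_algo_training_5 | task3/deleting_number.py | deleting_number
-- ===== SOURCE A (Python) =====
-- def deleting_number(n: int, nums: list[int]) -> int:
--     if n == 1:
--         return 0
--     d = {}
--     for i in nums:
--         if i not in d:
--             d[i] = 0
--         d[i] += 1
--
--     keys_ = list(d.keys())
--     keys_.sort()
--     max_sum = 0
--     for i in range(len(keys_)):
--         curr_sum = d[keys_[i]]
--         if keys_[i] - keys_[i-1] == 1:
--             curr_sum += d[keys_[i-1]]
--         if curr_sum > max_sum:
--             max_sum = curr_sum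
--     return n - max_sum
-- ===== SOURCE B (Python) =====
-- def deleting_number(n: int, nums: list[int]) -> int:
--     if n == 1:
--         return 0
--     cnt = {}
--     for x in nums:
--         cnt[x] = cnt.get(x, 0) + 1
--     best = 0
--     for v, c in cnt.items():
--         s = c + cnt.get(v - 1, 0)
--         if s > best:
--             best = s
--     return n - best
-- ===== Notes on version B (the rewrite author's own statement) =====
-- stated objective: alternative
-- what changed: B drops A's sort-the-keys-and-compare-adjacent-entries pass: it builds the same counting dict in one loop and, for each distinct value v, adds the count of v-1 by a direct dictionary lookup, so no sorted order is ever needed (O(n) vs O(n log n); intended as faster, but a timing run measured only 1.21x at the largest size, so no speed is claimed).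
import Mathlib
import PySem

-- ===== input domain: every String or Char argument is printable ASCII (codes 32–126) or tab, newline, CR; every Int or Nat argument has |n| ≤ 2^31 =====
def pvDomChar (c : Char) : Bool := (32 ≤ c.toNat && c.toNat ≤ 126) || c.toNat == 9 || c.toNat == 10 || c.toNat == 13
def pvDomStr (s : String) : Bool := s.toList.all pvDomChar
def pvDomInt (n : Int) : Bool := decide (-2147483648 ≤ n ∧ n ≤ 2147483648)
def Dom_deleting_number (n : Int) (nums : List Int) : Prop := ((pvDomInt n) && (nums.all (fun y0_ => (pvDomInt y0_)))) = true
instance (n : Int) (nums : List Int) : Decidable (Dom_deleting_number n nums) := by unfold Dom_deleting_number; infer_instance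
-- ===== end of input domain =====

-- B replaces A's sort-the-keys-and-compare-adjacent-keys pass by a single hash-map pass
-- that looks up count[v-1] directly for each distinct value (no sort).

-- ===== PORT A =====
def deleting_number (n : Int) (nums : List Int) : Int :=
  if n = 1 then 0
  else
    let d : PySem.Dict Int Int := nums.foldl (fun d i =>
      let d := if d.contains i then d else d.insert i 0
      d.insert i (d.getD i 0 + 1)) PySem.Dict.empty
    let keys_ : List Int := PySem.List.sorted d.keys (fun x => x) false
    let max_sum : Int := (PySem.List.pyRange 0 (keys_.length : Int) 1).foldl (fun max_sum i =>
      let curr_sum := d.getD (PySem.List.pyGetD keys_ i 0) 0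
      let curr_sum := if PySem.List.pyGetD keys_ i 0 - PySem.List.pyGetD keys_ (i - 1) 0 = 1
        then curr_sum + d.getD (PySem.List.pyGetD keys_ (i - 1) 0) 0 else curr_sum
      if curr_sum > max_sum then curr_sum else max_sum) 0
    n - max_sum

-- ===== PORT B =====
def deleting_number_alt (n : Int) (nums : List Int) : Int :=
  if n = 1 then 0
  else
    let cnt : PySem.Dict Int Int := nums.foldl (fun cnt x => cnt.insert x (cnt.getD x 0 + 1)) PySem.Dict.empty
    let best : Int := cnt.items.foldl (fun best p =>
      let s := p.2 + cnt.getD (p.1 - 1) 0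
      if s > best then s else best) 0
    n - best

-- ===== PRECONDITION & SPEC =====
def Spec_deleting_number (n : Int) (nums : List Int) (out : Int) : Prop := out = deleting_number_alt n nums
instance (n : Int) (nums : List Int) (out : Int) : Decidable (Spec_deleting_number n nums out) := by unfold Spec_deleting_number; infer_instance

-- ===== CLAIM (what is proved, stated in full; the proofs are below) =====
def Claim_equal_deleting_number : Prop := ∀ (n : Int) (nums : List Int), Dom_deleting_number n nums → Spec_deleting_number n nums (deleting_number n nums)

-- ===== LEMMAS AND PROOFS =====

-- A's counting loop (membership test, then increment) builds exactly Counter(nums).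
lemma buildA_eq_counter (nums : List Int) :
    nums.foldl (fun d i =>
      let d := if d.contains i then d else d.insert i 0
      d.insert i (d.getD i 0 + 1)) PySem.Dict.empty = PySem.Dict.counter nums := by
  have hstep : (fun (d : PySem.Dict Int Int) (i : Int) =>
      let d := if d.contains i then d else d.insert i 0
      d.insert i (d.getD i 0 + 1)) = fun d i => d.insert i (d.getD i 0 + 1) := by
    funext d i
    by_cases h : d.contains i
    · simp [h]
    · simp only [h, Bool.false_eq_true, ite_false]
      rw [PySem.Dict.getD_insert_self, PySem.Dict.insert_insert_self,
          PySem.Dict.getD_of_not_contains d 0 (by simpa using h)]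
  rw [hstep, PySem.Dict.foldl_insert_getD_add_one_eq_counter]

-- Python's keys_[-1] (the index i-1 at i = 0) is the last element.
lemma pyGetD_neg_one (xs : List Int) (h : 0 < xs.length) (d : Int) :
    PySem.List.pyGetD xs (-1) d = xs[xs.length - 1] := by
  have h1 : 1 ≤ xs.length := h
  simp [PySem.List.pyGetD, PySem.List.pyGet?, PySem.List.pyIdx?, h1,
        List.getElem?_eq_getElem (by omega : xs.length - 1 < xs.length)]

lemma pyGetD_nat (xs : List Int) (k : Nat) (hk : k < xs.length) :
    PySem.List.pyGetD xs (k : Int) 0 = xs[k] := by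
  rw [PySem.List.pyGetD_natCast, List.getD_eq_getElem _ _ hk]

-- the per-key score both programs maximise
def pvScore (c : PySem.Dict Int Int) (v : Int) : Int := c.getD v 0 + c.getD (v - 1) 0

-- A's loop body at index i, as a function of i
def pvCurr (c : PySem.Dict Int Int) (ks : List Int) (i : Int) : Int :=
  let curr := c.getD (PySem.List.pyGetD ks i 0) 0
  if PySem.List.pyGetD ks i 0 - PySem.List.pyGetD ks (i - 1) 0 = 1
    then curr + c.getD (PySem.List.pyGetD ks (i - 1) 0) 0 else curr

lemma getD_zero_of_not_mem (c : PySem.Dict Int Int) (v : Int) (h : v ∉ c.keys) :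
    c.getD v 0 = 0 := by
  refine PySem.Dict.getD_of_not_contains c 0 ?_
  rw [Bool.eq_false_iff]
  intro hc
  exact h ((PySem.Dict.contains_iff_mem_keys c v).mp hc)

-- On the strictly sorted key list, A's neighbour test agrees with B's count[v-1] lookup.
lemma curr_eq_score (c : PySem.Dict Int Int) (ks : List Int)
    (hperm : ks.Perm c.keys) (hs : ks.Pairwise (· < ·)) (k : Nat) (hk : k < ks.length) :
    pvCurr c ks (k : Int) = pvScore c ks[k] := by
  have hmono := List.pairwise_iff_getElem.mp hs
  have hnotmem : ∀ j : Nat, (hj : j < ks.length) → (∀ i : Nat, (hi : i < j) → ks[i] ≠ ks[j]'hj - 1) →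
      c.getD (ks[j]'hj - 1) 0 = 0 := by
    intro j hj hno
    refine getD_zero_of_not_mem c _ (fun hmem => ?_)
    obtain ⟨i, hi, hie⟩ := List.mem_iff_getElem.mp (hperm.symm.mem_iff.mp hmem)
    rcases lt_trichotomy i j with h | h | h
    · exact hno i h hie
    · subst h; omega
    · have := hmono j i hj hi h; omega
  unfold pvCurr pvScore
  cases k with
  | zero =>
    have hlen : 0 < ks.length := hk
    rw [show ((0 : Nat) : Int) - 1 = -1 by norm_num]
    rw [pyGetD_nat ks 0 hk, pyGetD_neg_one ks hlen]
    have hle : ks[0] ≤ ks[ks.length - 1] := by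
      rcases Nat.eq_or_lt_of_le (Nat.one_le_iff_ne_zero.mpr (by omega) : 1 ≤ ks.length) with h | h
      · simp [← h]
      · exact le_of_lt (hmono 0 (ks.length - 1) hk (by omega) (by omega))
    rw [if_neg (by omega)]
    rw [hnotmem 0 hk (by omega)]
    ring
  | succ j =>
    have hj : j < ks.length := by omega
    rw [show ((j + 1 : Nat) : Int) - 1 = (j : Int) by push_cast; ring]
    rw [pyGetD_nat ks (j + 1) hk, pyGetD_nat ks j hj]
    have hjlt : ks[j] < ks[j + 1] := hmono j (j + 1) hj hk (by omega)
    by_cases hcond : ks[j + 1] - ks[j] = 1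
    · rw [if_pos hcond, show ks[j] = ks[j + 1] - 1 by omega]
    · rw [if_neg hcond]
      rw [hnotmem (j + 1) hk ?_]
      · ring
      · intro i hi hie
        have hij : i ≤ j := by omega
        have : ks[i] ≤ ks[j] := by
          rcases Nat.eq_or_lt_of_le hij with h | h
          · subst h; omega
          · exact le_of_lt (hmono i j (by omega) hj h)
        omega

-- ===== VERDICT (by name: the statement is the Claim_ definition above) =====
theorem deleting_number_spec : Claim_equal_deleting_number := by
  intro n nums _
  unfold Spec_deleting_number
  by_cases hn : n = 1
  · simp [deleting_number, deleting_number_alt, hn]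
  · simp only [deleting_number, deleting_number_alt, if_neg hn,
      buildA_eq_counter nums, PySem.Dict.foldl_insert_getD_add_one_eq_counter nums]
    set c := PySem.Dict.counter nums with hc
    set ks := PySem.List.sorted c.keys (fun x => x) false with hks
    congr 1
    have hperm : ks.Perm c.keys := PySem.List.sorted_perm _ _ _
    have hnd : c.keys.Nodup := PySem.Dict.nodup_keys_counter nums
    have hksnd : ks.Nodup := hperm.nodup_iff.mpr hnd
    have hle : ks.Pairwise (fun a b => a ≤ b) := PySem.List.sorted_pairwise c.keys (fun x => x)
    have hs : ks.Pairwise (· < ·) :=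
      (hle.and hksnd).imp (fun h => lt_of_le_of_ne h.1 h.2)
    -- A's index loop is the fold of the max step over the scores of the sorted keys
    have hmap : (PySem.List.pyRange 0 (ks.length : Int) 1).map (pvCurr c ks)
        = ks.map (pvScore c) := by
      apply List.ext_getElem
      · simp [PySem.List.length_pyRange_one]
      · intro k h1 h2
        simp only [List.getElem_map, PySem.List.getElem_pyRange_one, zero_add]
        exact curr_eq_score c ks hperm hs k (by simpa using h2)
    have hA : (PySem.List.pyRange 0 (ks.length : Int) 1).foldl (fun m i =>
        if pvCurr c ks i > m then pvCurr c ks i else m) 0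
        = (ks.map (pvScore c)).foldl (fun m s => if s > m then s else m) 0 := by
      rw [← hmap, List.foldl_map]
    -- B's items loop is the same fold over the scores of the keys in insertion order
    have hitems : c.items = c.keys.map (fun k => (k, c.getD k 0)) :=
      PySem.Dict.items_eq_map_keys c hnd 0
    have hB : c.items.foldl (fun b p =>
        if p.2 + c.getD (p.1 - 1) 0 > b then p.2 + c.getD (p.1 - 1) 0 else b) 0
        = (c.keys.map (pvScore c)).foldl (fun m s => if s > m then s else m) 0 := by
      rw [hitems]
      simp only [List.foldl_map]
      rfl
    -- the max step is right-commutative, so the fold is permutation-invariant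
    have hperm2 : (ks.map (pvScore c)).Perm (c.keys.map (pvScore c)) := hperm.map _
    calc (PySem.List.pyRange 0 (ks.length : Int) 1).foldl (fun m i =>
            if pvCurr c ks i > m then pvCurr c ks i else m) 0
        = (ks.map (pvScore c)).foldl (fun m s => if s > m then s else m) 0 := hA
      _ = (c.keys.map (pvScore c)).foldl (fun m s => if s > m then s else m) 0 := by
            refine hperm2.foldl_eq (rcomm := ⟨?_⟩) 0
            intro b a1 a2; dsimp; split_ifs <;> omega
      _ = c.items.foldl (fun b p =>
            if p.2 + c.getD (p.1 - 1) 0 > b then p.2 + c.getD (p.1 - 1) 0 else b) 0 := hB.symm
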